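-- pv_equiv track=rewrite | github.com/vladyslav005/sudoku | utils.py | convert_to_1d
-- ===== SOURCE A (Python) =====
-- def convert_to_1d(input_board : []):
--     subgrid_matrix = None
--
--     if len(input_board) == 9:
--         subgrid_matrix = [[], [], [], [], [], [], [], [], []]
--     else:
--         subgrid_matrix = [[], [], [], []]
--
--     output_board = []
--
--     if len(input_board) == 9:
--
--         for subgrid_idx in range(0, 3):
--             for i in range(0, 3):
--                 subgrid_matrix[0].append(input_board[subgrid_idx][i])
--             for i in range(3, 6):
--                 subgrid_matrix[1].append(input_board[subgrid_idx][i])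
--             for i in range(6, 9):
--                 subgrid_matrix[2].append(input_board[subgrid_idx][i])
--
--         for subgrid_idx in range(3, 6):
--             for i in range(0, 3):
--                 subgrid_matrix[3].append(input_board[subgrid_idx][i])
--             for i in range(3, 6):
--                 subgrid_matrix[4].append(input_board[subgrid_idx][i])
--             for i in range(6, 9):
--                 subgrid_matrix[5].append(input_board[subgrid_idx][i])
--
--         for subgrid_idx in range(6, 9):
--             for i in range(0, 3):
--                 subgrid_matrix[6].append(input_board[subgrid_idx][i])
--             for i in range(3, 6):
--                 subgrid_matrix[7].append(input_board[subgrid_idx][i])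
--             for i in range(6, 9):
--                 subgrid_matrix[8].append(input_board[subgrid_idx][i])
--     else:
--         for subgrid_idx in range(0, 2):
--             for i in range(0, 2):
--                 subgrid_matrix[0].append(input_board[subgrid_idx][i])
--             for i in range(2, 4):
--                 subgrid_matrix[1].append(input_board[subgrid_idx][i])
--
--         for subgrid_idx in range(2, 4):
--             for i in range(0, 2):
--                 subgrid_matrix[2].append(input_board[subgrid_idx][i])
--             for i in range(2, 4):
--                 subgrid_matrix[3].append(input_board[subgrid_idx][i])
--     for i in range(len(subgrid_matrix)):
--         for j in range(len(subgrid_matrix[0])):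
--             output_board.append(str(subgrid_matrix[i][j]) if subgrid_matrix[i][j] != 0 else "")
--
--     return output_board
-- ===== SOURCE B (Python) =====
-- def convert_to_1d(input_board):
--     box = 3 if len(input_board) == 9 else 2
--     return [str(cell) if cell != 0 else ""
--             for box_row in range(box)
--             for box_col in range(box)
--             for r in range(box)
--             for c in range(box)
--             for cell in [input_board[box_row * box + r][box_col * box + c]]]
-- ===== Notes on version B (the rewrite author's own statement) =====
-- stated objective: simpler
-- what changed: Replaces the hand-unrolled construction of an intermediate subgrid_matrix (nine explicit append loops plus a second formatting pass) by a single comprehension that computes the subgrid-major index arithmetically as input_board[box_row*box+r][box_col*box+c].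
import Mathlib
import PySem

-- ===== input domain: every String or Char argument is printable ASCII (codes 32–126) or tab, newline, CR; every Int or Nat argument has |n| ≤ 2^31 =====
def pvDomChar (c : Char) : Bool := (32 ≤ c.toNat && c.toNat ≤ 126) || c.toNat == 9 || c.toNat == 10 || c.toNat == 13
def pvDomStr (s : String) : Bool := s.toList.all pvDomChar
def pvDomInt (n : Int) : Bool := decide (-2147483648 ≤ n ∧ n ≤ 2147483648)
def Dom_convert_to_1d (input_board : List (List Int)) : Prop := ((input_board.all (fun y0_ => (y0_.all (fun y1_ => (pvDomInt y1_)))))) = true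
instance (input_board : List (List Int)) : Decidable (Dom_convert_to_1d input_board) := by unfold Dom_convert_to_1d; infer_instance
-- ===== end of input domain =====

-- B replaces A's hand-unrolled subgrid_matrix construction (nine append loops + a second
-- formatting pass) by one comprehension computing the subgrid-major index arithmetically.


-- ===== PORT A =====
-- board[r][i], with 0 as the (never used inside Pre_) out-of-range default
def pvCellA (b : List (List Int)) (r i : Int) : Int :=
  PySem.List.pyGetD (PySem.List.pyGetD b r []) i 0

-- subgrid_matrix[k].append(x)
def pvAppendA (m : List (List Int)) (k : Nat) (x : Int) : List (List Int) :=
  m.modify k (· ++ [x])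

def convert_to_1d (input_board : List (List Int)) : List String :=
  let subgrid_matrix : List (List Int) :=
    if input_board.length == 9 then [[], [], [], [], [], [], [], [], []] else [[], [], [], []]
  let output_board : List String := []
  let subgrid_matrix :=
    if input_board.length == 9 then
      let sm := (PySem.List.pyRange 0 3 1).foldl (fun sm sg =>
        let sm := (PySem.List.pyRange 0 3 1).foldl (fun sm i => pvAppendA sm 0 (pvCellA input_board sg i)) sm
        let sm := (PySem.List.pyRange 3 6 1).foldl (fun sm i => pvAppendA sm 1 (pvCellA input_board sg i)) sm
        (PySem.List.pyRange 6 9 1).foldl (fun sm i => pvAppendA sm 2 (pvCellA input_board sg i)) sm) subgrid_matrix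
      let sm := (PySem.List.pyRange 3 6 1).foldl (fun sm sg =>
        let sm := (PySem.List.pyRange 0 3 1).foldl (fun sm i => pvAppendA sm 3 (pvCellA input_board sg i)) sm
        let sm := (PySem.List.pyRange 3 6 1).foldl (fun sm i => pvAppendA sm 4 (pvCellA input_board sg i)) sm
        (PySem.List.pyRange 6 9 1).foldl (fun sm i => pvAppendA sm 5 (pvCellA input_board sg i)) sm) sm
      (PySem.List.pyRange 6 9 1).foldl (fun sm sg =>
        let sm := (PySem.List.pyRange 0 3 1).foldl (fun sm i => pvAppendA sm 6 (pvCellA input_board sg i)) sm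
        let sm := (PySem.List.pyRange 3 6 1).foldl (fun sm i => pvAppendA sm 7 (pvCellA input_board sg i)) sm
        (PySem.List.pyRange 6 9 1).foldl (fun sm i => pvAppendA sm 8 (pvCellA input_board sg i)) sm) sm
    else
      let sm := (PySem.List.pyRange 0 2 1).foldl (fun sm sg =>
        let sm := (PySem.List.pyRange 0 2 1).foldl (fun sm i => pvAppendA sm 0 (pvCellA input_board sg i)) sm
        (PySem.List.pyRange 2 4 1).foldl (fun sm i => pvAppendA sm 1 (pvCellA input_board sg i)) sm) subgrid_matrix
      (PySem.List.pyRange 2 4 1).foldl (fun sm sg =>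
        let sm := (PySem.List.pyRange 0 2 1).foldl (fun sm i => pvAppendA sm 2 (pvCellA input_board sg i)) sm
        (PySem.List.pyRange 2 4 1).foldl (fun sm i => pvAppendA sm 3 (pvCellA input_board sg i)) sm) sm
  (PySem.List.pyRange 0 (subgrid_matrix.length : Int) 1).foldl (fun ob i =>
    (PySem.List.pyRange 0 ((subgrid_matrix.headD []).length : Int) 1).foldl (fun ob j =>
      ob ++ [if pvCellA subgrid_matrix i j ≠ 0 then PySem.Int.toStr (pvCellA subgrid_matrix i j) else ""]) ob)
    output_board

-- ===== PORT B =====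
def convert_to_1d_alt (input_board : List (List Int)) : List String :=
  let box : Int := if input_board.length == 9 then 3 else 2
  (PySem.List.pyRange 0 box 1).flatMap (fun box_row =>
    (PySem.List.pyRange 0 box 1).flatMap (fun box_col =>
      (PySem.List.pyRange 0 box 1).flatMap (fun r =>
        (PySem.List.pyRange 0 box 1).flatMap (fun c =>
          [PySem.List.pyGetD (PySem.List.pyGetD input_board (box_row * box + r) []) (box_col * box + c) 0].map (fun cell =>
            if cell ≠ 0 then PySem.Int.toStr cell else "")))))

-- ===== PRECONDITION & SPEC =====
-- Pre_ excludes exactly the inputs where the Python A raises IndexError: a 9-row board needs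
-- every row of length ≥ 9; any other board needs ≥ 4 rows whose first 4 each have length ≥ 4.
def Pre_convert_to_1d (input_board : List (List Int)) : Prop :=
  (input_board.length = 9 ∧ ∀ row ∈ input_board, 9 ≤ row.length) ∨
  (input_board.length ≠ 9 ∧ 4 ≤ input_board.length ∧ ∀ row ∈ input_board.take 4, 4 ≤ row.length)
instance (input_board : List (List Int)) : Decidable (Pre_convert_to_1d input_board) := by
  unfold Pre_convert_to_1d; infer_instance
def pvWitness_convert_to_1d : List (List Int) :=
  [[1,2,3,4],[5,6,7,8],[0,1,2,3],[4,5,6,7]]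
def Spec_convert_to_1d (input_board : List (List Int)) (out : List String) : Prop := out = convert_to_1d_alt input_board
instance (input_board : List (List Int)) (out : List String) : Decidable (Spec_convert_to_1d input_board out) := by unfold Spec_convert_to_1d; infer_instance

-- ===== CLAIM (what is proved, stated in full; the proofs are below) =====
def Claim_equal_convert_to_1d : Prop := ∀ (input_board : List (List Int)), Dom_convert_to_1d input_board → Pre_convert_to_1d input_board → Spec_convert_to_1d input_board (convert_to_1d input_board)

-- ===== LEMMAS AND PROOFS =====

-- ===== VERDICT (by name: the statement is the Claim_ definition above) =====
theorem convert_to_1d_spec : Claim_equal_convert_to_1d := by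
  intro b _ hp
  unfold Spec_convert_to_1d
  have e03 : PySem.List.pyRange (0:Int) 3 1 = [0,1,2] := by decide
  have e36 : PySem.List.pyRange (3:Int) 6 1 = [3,4,5] := by decide
  have e69 : PySem.List.pyRange (6:Int) 9 1 = [6,7,8] := by decide
  have e09 : PySem.List.pyRange (0:Int) 9 1 = [0,1,2,3,4,5,6,7,8] := by decide
  have e02 : PySem.List.pyRange (0:Int) 2 1 = [0,1] := by decide
  have e24 : PySem.List.pyRange (2:Int) 4 1 = [2,3] := by decide
  have e04 : PySem.List.pyRange (0:Int) 4 1 = [0,1,2,3] := by decide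
  rcases hp with ⟨h9, -⟩ | ⟨hne, -, -⟩
  · simp only [convert_to_1d, convert_to_1d_alt, h9, e03, e36, e69,
      beq_self_eq_true, if_pos, List.foldl, List.flatMap, pvAppendA, List.modify,
      List.headD, List.map]
    norm_num [pvCellA, PySem.List.pyGetD_ofNat', List.getD_cons_zero, List.getD_cons_succ, List.getD]
    norm_num [Nat.cast_ofNat, e09, List.flatten, PySem.List.pyGetD_ofNat', List.getD_cons_zero, List.getD_cons_succ, List.getD]
  · have hb : (b.length == 9) = false := by simp [hne]
    simp only [convert_to_1d, convert_to_1d_alt, hb, e02, e24,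
      Bool.false_eq_true, if_false, List.foldl, List.flatMap, pvAppendA, List.modify,
      List.headD, List.map]
    norm_num [pvCellA, PySem.List.pyGetD_ofNat', List.getD_cons_zero, List.getD_cons_succ, List.getD]
    norm_num [Nat.cast_ofNat, e04, List.flatten, PySem.List.pyGetD_ofNat', List.getD_cons_zero, List.getD_cons_succ, List.getD]
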